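-- pv_equiv track=rewrite | github.com/adityakangune/HackerRank-Python | The Love-Letter Mystery.py | func
-- ===== SOURCE A (Python) =====
-- def func(s):
--     s = list(s)
--     i = 0
--     j = len(s)
--     c = 0
--     for _ in range(len(s)):
--         if s[::] != s[::-1]:
--             if s[i] != s[j-1]:
--                 #s[j-1] = chr(ord(s[j-1]) - 1)
--                 c += 1
--             i += 1
--             j -= 1
--     return c
-- ===== SOURCE B (Python) =====
-- def func(s):
--     return sum(a != b for a, b in zip(s, reversed(s)))
-- ===== Notes on version B (the rewrite author's own statement) =====
-- stated objective: faster
-- what changed: Replaced A's loop that re-checks full-palindrome-ness (an O(n) list reversal and comparison) on every iteration and walks two explicit index pointers with a single zip over the string and its reverse summing the mismatches; equal because the per-iteration palindrome test never changes and a palindrome has zero mismatches anyway.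
import Mathlib
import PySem

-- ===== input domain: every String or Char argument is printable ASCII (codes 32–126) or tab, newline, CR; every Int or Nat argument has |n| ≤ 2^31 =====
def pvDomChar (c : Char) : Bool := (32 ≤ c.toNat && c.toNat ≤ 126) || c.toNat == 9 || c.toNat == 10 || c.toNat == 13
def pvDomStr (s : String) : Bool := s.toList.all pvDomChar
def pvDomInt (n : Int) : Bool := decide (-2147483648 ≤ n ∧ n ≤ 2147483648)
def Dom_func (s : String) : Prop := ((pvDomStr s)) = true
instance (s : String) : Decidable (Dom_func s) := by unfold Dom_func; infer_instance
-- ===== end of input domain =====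

-- B replaces A's per-iteration full palindrome re-check and two-pointer walk by one
-- linear zip of the string with its reverse, summing mismatches (faster: O(n) vs O(n^2)).

-- ===== PORT A =====
def func (s : String) : Int :=
  let l := s.toList
  let st := (PySem.List.pyRange 0 (l.length : Int) 1).foldl
    (fun (st : Int × Int × Int) _ =>
      let i := st.1
      let j := st.2.1
      let c := st.2.2
      if some (PySem.List.slice l none none) ≠ PySem.List.slice? l none none (-1) then
        let c' := if PySem.List.pyGet? l i ≠ PySem.List.pyGet? l (j - 1) then c + 1 else c
        (i + 1, j - 1, c')
      else (i, j, c))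
    (0, (l.length : Int), 0)
  st.2.2

-- ===== PORT B =====
def func_alt (s : String) : Int :=
  let l := s.toList
  ((l.zip l.reverse).map (fun p => if p.1 ≠ p.2 then (1 : Int) else 0)).sum

-- ===== PRECONDITION & SPEC =====
def Spec_func (s : String) (out : Int) : Prop := out = func_alt s
instance (s : String) (out : Int) : Decidable (Spec_func s out) := by unfold Spec_func; infer_instance

-- ===== CLAIM (what is proved, stated in full; the proofs are below) =====
def Claim_equal_func : Prop := ∀ (s : String), Dom_func s → Spec_func s (func s)

-- ===== LEMMAS AND PROOFS =====

-- mismatch indicator at index k, and its prefix sum (common form of both results)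
def mism (l : List Char) (k : Nat) : Int := if l[k]? ≠ (l.reverse)[k]? then 1 else 0

def cnt (l : List Char) (m : Nat) : Int := ((List.range m).map (mism l)).sum

lemma foldl_id {α β : Type} (xs : List α) (b : β) :
    xs.foldl (fun st _ => st) b = b := by
  induction xs <;> simp_all

lemma zip_self_sum_zero (l : List Char) :
    ((l.zip l).map (fun p => if p.1 ≠ p.2 then (1 : Int) else 0)).sum = 0 := by
  induction l with
  | nil => simp
  | cons x l ih => simpa using ih

lemma zip_mismatch_sum (l : List Char) :
    ((l.zip l.reverse).map (fun p => if p.1 ≠ p.2 then (1 : Int) else 0)).sum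
      = cnt l l.length := by
  -- general form over any second list of equal length, then specialize
  suffices h : ∀ (a b : List Char), a.length = b.length →
      ((a.zip b).map (fun p => if p.1 ≠ p.2 then (1 : Int) else 0)).sum
        = ((List.range a.length).map (fun k => if a[k]? ≠ b[k]? then (1 : Int) else 0)).sum by
    have := h l l.reverse (by simp)
    simp only [cnt]
    exact this
  intro a
  induction a with
  | nil => intro b hb; simp
  | cons x a ih =>
    intro b hb
    cases b with
    | nil => simp at hb
    | cons y b =>
      simp only [List.length_cons] at hb
      have hb' : a.length = b.length := by omega
      simp only [List.zip_cons_cons, List.map_cons, List.sum_cons, List.length_cons,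
        List.range_succ_eq_map, List.map_map]
      rw [ih b hb']
      simp only [Function.comp_def, List.getElem?_cons_zero, List.getElem?_cons_succ,
        ne_eq, Option.some.injEq]
      rfl

lemma cnt_succ (l : List Char) (m : Nat) : cnt l (m + 1) = cnt l m + mism l m := by
  simp [cnt, List.range_succ]

lemma loopA (l : List Char) (hne : l ≠ l.reverse) (m : Nat) (hm : m ≤ l.length) :
    (List.range m).foldl
      (fun (st : Int × Int × Int) (_ : Nat) =>
        let i := st.1
        let j := st.2.1
        let c := st.2.2
        if some (PySem.List.slice l none none) ≠ PySem.List.slice? l none none (-1) then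
          let c' := if PySem.List.pyGet? l i ≠ PySem.List.pyGet? l (j - 1) then c + 1 else c
          (i + 1, j - 1, c')
        else (i, j, c))
      (0, (l.length : Int), 0)
    = ((m : Int), (l.length : Int) - m, cnt l m) := by
  induction m with
  | zero => simp [cnt]
  | succ m ih =>
    have hm' : m ≤ l.length := by omega
    have hmlt : m < l.length := by omega
    rw [List.range_succ, List.foldl_append, ih hm']
    have hcond : some (PySem.List.slice l none none) ≠ PySem.List.slice? l none none (-1) := by
      rw [PySem.List.slice_none_none, PySem.List.slice?_none_none_neg_one]
      simpa using hne
    simp only [List.foldl_cons, List.foldl_nil, if_pos hcond]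
    have hidx : ((l.length : Int) - m) - 1 = ((l.length - 1 - m : Nat) : Int) := by omega
    have hget1 : PySem.List.pyGet? l ((m : Int)) = l[m]? := PySem.List.pyGet?_natCast l m
    have hget2 : PySem.List.pyGet? l (((l.length : Int) - m) - 1) = (l.reverse)[m]? := by
      rw [hidx, PySem.List.pyGet?_natCast, List.getElem?_reverse hmlt]
    rw [cnt_succ]
    simp only [hget1, hget2, mism, Prod.mk.injEq]
    refine ⟨by push_cast; ring, by push_cast; ring, ?_⟩
    split_ifs <;> omega

-- ===== VERDICT (by name: the statement is the Claim_ definition above) =====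
theorem func_spec : Claim_equal_func := by
  intro s _
  unfold Spec_func func func_alt
  dsimp only
  generalize s.toList = l
  by_cases hpal : l = l.reverse
  · -- palindrome: A's loop body never changes the state; B sums over equal pairs
    have hcond : ¬ some (PySem.List.slice l none none) ≠ PySem.List.slice? l none none (-1) := by
      rw [PySem.List.slice_none_none, PySem.List.slice?_none_none_neg_one]
      simpa using hpal
    simp only [if_neg hcond]
    rw [foldl_id]
    rw [← hpal]
    exact (zip_self_sum_zero l).symm
  · rw [PySem.List.pyRange_one, List.foldl_map]
    simp only [Int.sub_zero, Int.toNat_natCast]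
    rw [loopA l hpal l.length le_rfl]
    exact (zip_mismatch_sum l).symm
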